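-- pv_equiv track=rewrite | github.com/usamaalam01/LabReportAI | backend/app/services/pii_scrubber.py | get_pii_summary
-- ===== SOURCE A (Python) =====
-- def get_pii_summary(original: str, scrubbed: str) -> dict:
--     """Get a summary of what PII was redacted.
--
--     Args:
--         original: Original text before scrubbing.
--         scrubbed: Text after scrubbing.
--
--     Returns:
--         Dict with counts of each redaction type.
--     """
--     redaction_markers = [
--         "[REDACTED]",
--         "[ID_REDACTED]",
--         "[PHONE_REDACTED]",
--         "[ADDRESS_REDACTED]",
--         "[CITY_REDACTED]",
--         "[DOB_REDACTED]",
--         "[DOCTOR_REDACTED]",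
--         "[LAB_REDACTED]",
--         "[EMAIL_REDACTED]",
--         "[CNIC_REDACTED]",
--     ]
--
--     summary = {}
--     for marker in redaction_markers:
--         count = scrubbed.count(marker)
--         if count > 0:
--             key = marker.strip("[]").lower()
--             summary[key] = count
--
--     return summary
-- ===== SOURCE B (Python) =====
-- def get_pii_summary(original: str, scrubbed: str) -> dict:
--     """Get a summary of what PII was redacted (single-scan tokenizer version)."""
--     redaction_markers = [
--         "[REDACTED]",
--         "[ID_REDACTED]",
--         "[PHONE_REDACTED]",
--         "[ADDRESS_REDACTED]",
--         "[CITY_REDACTED]",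
--         "[DOB_REDACTED]",
--         "[DOCTOR_REDACTED]",
--         "[LAB_REDACTED]",
--         "[EMAIL_REDACTED]",
--         "[CNIC_REDACTED]",
--     ]
--     counts = {}
--     i = 0
--     n = len(scrubbed)
--     while i < n:
--         if scrubbed[i] == "[":
--             for marker in redaction_markers:
--                 if scrubbed.startswith(marker, i):
--                     counts[marker] = counts.get(marker, 0) + 1
--                     i += len(marker)
--                     break
--             else:
--                 i += 1
--         else:
--             i += 1
--
--     summary = {}
--     for marker in redaction_markers:
--         c = counts.get(marker, 0)
--         if c > 0:
--             summary[marker.strip("[]").lower()] = c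
--     return summary
-- ===== Notes on version B (the rewrite author's own statement) =====
-- stated objective: alternative
-- what changed: Replaces ten independent scrubbed.count(marker) scans with one left-to-right tokenizing scan that tries the markers only at '[' and jumps over each match while tallying all counts in a single dict, from which the summary is then built.
import Mathlib
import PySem

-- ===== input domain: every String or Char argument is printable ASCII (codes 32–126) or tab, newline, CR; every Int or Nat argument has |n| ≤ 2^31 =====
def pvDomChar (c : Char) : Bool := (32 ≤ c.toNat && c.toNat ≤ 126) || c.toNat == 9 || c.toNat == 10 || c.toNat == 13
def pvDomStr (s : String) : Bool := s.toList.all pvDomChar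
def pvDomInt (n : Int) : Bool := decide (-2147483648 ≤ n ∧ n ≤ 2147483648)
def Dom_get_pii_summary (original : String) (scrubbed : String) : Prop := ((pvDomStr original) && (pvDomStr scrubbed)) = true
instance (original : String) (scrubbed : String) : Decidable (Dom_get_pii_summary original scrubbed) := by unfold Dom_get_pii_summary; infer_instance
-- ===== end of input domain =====

-- B replaces ten independent substring-count scans with one left-to-right tokenizing
-- scan that tallies all markers in a single pass (alternative algorithm, same value).

-- ===== PORT A =====
def pvMarkersA : List String :=
  ["[REDACTED]", "[ID_REDACTED]", "[PHONE_REDACTED]", "[ADDRESS_REDACTED]",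
   "[CITY_REDACTED]", "[DOB_REDACTED]", "[DOCTOR_REDACTED]", "[LAB_REDACTED]",
   "[EMAIL_REDACTED]", "[CNIC_REDACTED]"]

def get_pii_summary (original : String) (scrubbed : String) : List (String × Int) :=
  (pvMarkersA.foldl
    (fun summary marker =>
      let count : Int := (PySem.Str.count scrubbed marker : Int)
      if count > 0 then
        summary.insert (PySem.Str.lower (PySem.Str.stripChars marker "[]")) count
      else summary)
    PySem.Dict.empty).items

-- ===== PORT B =====
def pvMarkersB : List (List Char) :=
  ["[REDACTED]".toList, "[ID_REDACTED]".toList, "[PHONE_REDACTED]".toList,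
   "[ADDRESS_REDACTED]".toList, "[CITY_REDACTED]".toList, "[DOB_REDACTED]".toList,
   "[DOCTOR_REDACTED]".toList, "[LAB_REDACTED]".toList, "[EMAIL_REDACTED]".toList,
   "[CNIC_REDACTED]".toList]

-- the while-loop of Source B: the unread suffix of `scrubbed` is the loop state;
-- the `for … break / else` over the markers is `find?`
def pvScanB : List Char → PySem.Dict (List Char) Int → PySem.Dict (List Char) Int
  | [], counts => counts
  | c :: t, counts =>
    if c = '[' then
      match h : pvMarkersB.find? (fun m => m.isPrefixOf (c :: t)) with
      | some m => pvScanB ((c :: t).drop m.length) (counts.insert m (counts.getD m 0 + 1))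
      | none => pvScanB t counts
    else pvScanB t counts
termination_by l _ => l.length
decreasing_by
  · have hmem := List.mem_of_find?_eq_some h
    have hlen : 1 ≤ m.length := by
      have h' : ∀ m ∈ pvMarkersB, 1 ≤ m.length := by decide
      exact h' m hmem
    simp [List.length_drop]
    omega
  · simp
  · simp

def get_pii_summary_alt (original : String) (scrubbed : String) : List (String × Int) :=
  let counts := pvScanB scrubbed.toList PySem.Dict.empty
  (pvMarkersB.foldl
    (fun summary m =>
      let c : Int := counts.getD m 0
      if c > 0 then
        summary.insert (String.ofList (PySem.Chars.lower (PySem.Chars.stripChars m "[]".toList))) c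
      else summary)
    PySem.Dict.empty).items

-- ===== PRECONDITION & SPEC =====
def Spec_get_pii_summary (original : String) (scrubbed : String) (out : List (String × Int)) : Prop := out = get_pii_summary_alt original scrubbed
instance (original : String) (scrubbed : String) (out : List (String × Int)) : Decidable (Spec_get_pii_summary original scrubbed out) := by unfold Spec_get_pii_summary; infer_instance

-- ===== CLAIM (what is proved, stated in full; the proofs are below) =====
def Claim_equal_get_pii_summary : Prop := ∀ (original : String) (scrubbed : String), Dom_get_pii_summary original scrubbed → Spec_get_pii_summary original scrubbed (get_pii_summary original scrubbed)

-- ===== LEMMAS AND PROOFS =====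

-- greedy non-overlapping count of m in l: the quantity Python's str.count computes
def pvGcnt (m : List Char) : List Char → Nat
  | [] => 0
  | c :: t => if m.isPrefixOf (c :: t) then pvGcnt m (t.drop (m.length - 1)) + 1 else pvGcnt m t
termination_by l => l.length
decreasing_by all_goals simp [List.length_drop]

lemma pvGo_eq_gcnt (m : List Char) (hm : m ≠ []) :
    ∀ (fuel : Nat) (l : List Char) (acc : Nat), l.length ≤ fuel →
      PySem.Chars.count.go m fuel l acc = acc + pvGcnt m l := by
  intro fuel
  induction fuel with
  | zero =>
    intro l acc hl
    have : l = [] := by cases l <;> simp_all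
    subst this
    simp [PySem.Chars.count.go, pvGcnt]
  | succ fuel ih =>
    intro l acc hl
    cases l with
    | nil => simp [PySem.Chars.count.go, pvGcnt]
    | cons c t =>
      rw [PySem.Chars.count.go]
      by_cases hp : m.isPrefixOf (c :: t) = true
      · rw [if_pos hp]
        have hml : 1 ≤ m.length := by cases m <;> simp_all
        have hdrop : (c :: t).drop m.length = t.drop (m.length - 1) := by
          cases m with
          | nil => simp_all
          | cons a b => simp [List.drop_succ_cons]
        rw [hdrop, ih _ _ (by simp [List.length_drop] at *; omega)]
        rw [pvGcnt, if_pos hp]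
        omega
      · rw [if_neg hp, ih _ _ (by simp at hl; omega)]
        rw [pvGcnt, if_neg hp]

lemma pvCount_eq_gcnt (m : List Char) (hm : m ≠ []) (s : List Char) :
    PySem.Chars.count s m = pvGcnt m s := by
  rw [PySem.Chars.count, if_neg (by simp [List.isEmpty_iff, hm]),
    pvGo_eq_gcnt m hm _ _ _ le_rfl]
  omega

lemma pvGcnt_drop (m : List Char) :
    ∀ (k : Nat) (l : List Char), (∀ j, j < k → ¬ m.isPrefixOf (l.drop j) = true) →
      pvGcnt m l = pvGcnt m (l.drop k) := by
  intro k
  induction k with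
  | zero => intro l _; simp
  | succ k ih =>
    intro l h
    cases l with
    | nil => simp
    | cons c t =>
      have h0 : ¬ m.isPrefixOf (c :: t) = true := by simpa using h 0 (by omega)
      rw [pvGcnt, if_neg h0]
      rw [ih t (fun j hj => by simpa using h (j+1) (by omega))]
      simp [List.drop_succ_cons]

lemma pvHeadAppend (xs ys : List Char) (h : xs ≠ []) : (xs ++ ys).head? = xs.head? := by
  cases xs with
  | nil => exact absurd rfl h
  | cons a b => simp

lemma pvScan_getD (m : List Char) (hm : m ∈ pvMarkersB) :
    ∀ (l : List Char) (counts : PySem.Dict (List Char) Int),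
      (pvScanB l counts).getD m 0 = counts.getD m 0 + (pvGcnt m l : Int) := by
  have hne : m ≠ [] := by
    have h : ∀ x ∈ pvMarkersB, x ≠ ([] : List Char) := by decide
    exact h m hm
  have hhead : m.head? = some '[' := by
    have h : ∀ x ∈ pvMarkersB, x.head? = some '[' := by decide
    exact h m hm
  suffices H : ∀ (n : Nat) (l : List Char), l.length ≤ n → ∀ counts,
      (pvScanB l counts).getD m 0 = counts.getD m 0 + (pvGcnt m l : Int) by
    exact fun l counts => H l.length l le_rfl counts
  intro n
  induction n with
  | zero =>
    intro l hl counts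
    have : l = [] := by cases l <;> simp_all
    subst this
    simp [pvScanB, pvGcnt]
  | succ n ih =>
    intro l hl counts
    cases l with
    | nil => simp [pvScanB, pvGcnt]
    | cons c t =>
      simp only [List.length_cons] at hl
      rw [pvScanB]
      by_cases hc : c = '['
      · rw [if_pos hc]
        cases hfind : pvMarkersB.find? (fun x => x.isPrefixOf (c :: t)) with
        | none =>
          have hnp : ¬ m.isPrefixOf (c :: t) = true := by
            have := List.find?_eq_none.mp hfind m hm
            simpa using this
          rw [pvGcnt, if_neg hnp]
          exact ih t (by omega) counts
        | some m0 =>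
          have hp0 : m0.isPrefixOf (c :: t) = true := by
            have := List.find?_some hfind
            simpa using this
          have hm0mem := List.mem_of_find?_eq_some hfind
          have hm0len : 1 ≤ m0.length := by
            have h : ∀ x ∈ pvMarkersB, 1 ≤ x.length := by decide
            exact h m0 hm0mem
          have hlen' : ((c :: t).drop m0.length).length ≤ n := by
            simp [List.length_drop]; omega
          by_cases hmm : m = m0
          · subst hmm
            rw [ih _ hlen' _]
            have hins : (counts.insert m (counts.getD m 0 + 1)).getD m 0 = counts.getD m 0 + 1 := by
              simp [pysem]
            rw [hins]
            have hdrop : (c :: t).drop m.length = t.drop (m.length - 1) := by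
              cases m with
              | nil => simp_all
              | cons a b => simp [List.drop_succ_cons]
            rw [hdrop, pvGcnt, if_pos hp0]
            push_cast
            ring
          · rw [ih _ hlen' _]
            have hins : (counts.insert m0 (counts.getD m0 0 + 1)).getD m 0 = counts.getD m 0 := by
              simp [pysem]
              intro h
              exact absurd h hmm
            rw [hins]
            have hnomatch : ∀ j, j < m0.length → ¬ m.isPrefixOf ((c :: t).drop j) = true := by
              intro j hj hpj
              obtain ⟨r0, hr0⟩ := List.isPrefixOf_iff_prefix.mp hp0
              obtain ⟨r, hr⟩ := List.isPrefixOf_iff_prefix.mp hpj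
              rcases Nat.eq_zero_or_pos j with hj0 | hj0
              · subst hj0
                simp at hr
                -- m and m0 are both prefixes of c :: t, but no marker is a prefix of another
                have hpre : m <+: m0 ∨ m0 <+: m :=
                  List.prefix_or_prefix_of_prefix ⟨r, hr⟩ ⟨r0, hr0⟩
                have hF3 : ∀ x ∈ pvMarkersB, ∀ y ∈ pvMarkersB, x.isPrefixOf y = true → x = y := by decide
                rcases hpre with h1 | h1
                · exact hmm (hF3 m hm m0 hm0mem (List.isPrefixOf_iff_prefix.mpr h1))
                · exact hmm ((hF3 m0 hm0mem m hm (List.isPrefixOf_iff_prefix.mpr h1)).symm)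
              · -- inside m0's span the text has m0's characters, none of which is '['
                have hdj : (c :: t).drop j = m0.drop j ++ r0 := by
                  rw [← hr0, List.drop_append_of_le_length (by omega)]
                have hdropne : m0.drop j ≠ [] := by
                  intro hnil
                  have := congrArg List.length hnil
                  simp [List.length_drop] at this
                  omega
                have hhd : ((c :: t).drop j).head? = m0[j]? := by
                  rw [hdj, pvHeadAppend _ _ hdropne]
                  exact List.head?_drop
                have hmhd : ((c :: t).drop j).head? = some '[' := by
                  rw [← hr, pvHeadAppend _ _ hne, hhead]
                have hF2b : pvMarkersB.all (fun x => x.tail.all (fun d => d != '[')) = true := by rfl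
                have hF2 : ∀ x ∈ pvMarkersB, ∀ d ∈ x.tail, d ≠ '[' := by
                  simpa [List.all_eq_true] using hF2b
                have hsome : m0[j]? = some '[' := by rw [← hhd, hmhd]
                have htail : m0.tail[j-1]? = some '[' := by
                  rw [List.getElem?_tail, show j - 1 + 1 = j from by omega]
                  exact hsome
                exact hF2 m0 hm0mem '[' (List.mem_of_getElem? htail) rfl
            rw [pvGcnt_drop m m0.length (c :: t) hnomatch]
      · rw [if_neg hc]
        have hnp : ¬ m.isPrefixOf (c :: t) = true := by
          intro hp
          obtain ⟨r, hr⟩ := List.isPrefixOf_iff_prefix.mp hp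
          have : (c :: t).head? = some '[' := by rw [← hr, pvHeadAppend _ _ hne, hhead]
          simp at this
          exact hc this
        rw [pvGcnt, if_neg hnp]
        exact ih t (by omega) counts

lemma pvScan_count (m : List Char) (hm : m ∈ pvMarkersB) (s : List Char) :
    (pvScanB s PySem.Dict.empty).getD m 0 = (PySem.Chars.count s m : Int) := by
  have hne : m ≠ [] := by
    have h : ∀ x ∈ pvMarkersB, x ≠ ([] : List Char) := by decide
    exact h m hm
  rw [pvScan_getD m hm s PySem.Dict.empty, pvCount_eq_gcnt m hne s]
  simp [pysem, PySem.Dict.getD, PySem.Dict.get?, PySem.Dict.empty]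

-- ===== VERDICT (by name: the statement is the Claim_ definition above) =====
theorem get_pii_summary_spec : Claim_equal_get_pii_summary := by
  intro original scrubbed _
  unfold Spec_get_pii_summary get_pii_summary get_pii_summary_alt
  show _ = (PySem.Dict.items _)
  have hMB : pvMarkersB = pvMarkersA.map String.toList := by decide
  rw [hMB, List.foldl_map]
  congr 1
  apply PySem.List.foldl_congr_mem
  intro acc marker hmem
  have hmB : marker.toList ∈ pvMarkersB := by rw [hMB]; exact List.mem_map_of_mem hmem
  have hcnt : (PySem.Str.count scrubbed marker : Int)
      = (pvScanB scrubbed.toList PySem.Dict.empty).getD marker.toList 0 :=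
    (pvScan_count marker.toList hmB scrubbed.toList).symm
  have hkey : PySem.Str.lower (PySem.Str.stripChars marker "[]")
      = String.ofList (PySem.Chars.lower (PySem.Chars.stripChars marker.toList "[]".toList)) := by
    rw [← String.ofList_toList (s := PySem.Str.lower (PySem.Str.stripChars marker "[]")),
      PySem.Str.toList_lower, PySem.Str.toList_stripChars]
  simp only [← hcnt, ← hkey]
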